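-- pv_equiv track=rewrite | github.com/RosemarieSchoolAssign/aoc21 | 9dec.py | get_depths_in_row
-- ===== SOURCE A (Python) =====
-- def get_depths_in_row(row):
--     b = []
--     start = 0
--     for i in range(len(row)):
--         if row[i] == 9 and row[i-1] != 9 and i != 0:
--             b.append([k for k in range(start, i)])
--         elif i == len(row) - 1 and row[i] != 9:  # controlling for end of list
--             b.append([k for k in range(start, i+1)])
--         if row[i] == 9:  # increasing start to have right index value
--             start = i + 1
--     return b
-- ===== SOURCE B (Python) =====
-- def get_depths_in_row(row):
--     b = []
--     current = []
--     for i, v in enumerate(row):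
--         if v == 9:
--             if current:
--                 b.append(current)
--                 current = []
--         else:
--             current.append(i)
--     if current:
--         b.append(current)
--     return b
-- ===== Notes on version B (the rewrite author's own statement) =====
-- stated objective: simpler
-- what changed: B keeps the live segment of indices in a `current` list and flushes it on each 9 (and once after the loop), replacing A's `start` pointer, range() reconstruction, row[i-1] look-back and last-element special case with one uniform accumulate-and-flush pass.
import Mathlib
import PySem

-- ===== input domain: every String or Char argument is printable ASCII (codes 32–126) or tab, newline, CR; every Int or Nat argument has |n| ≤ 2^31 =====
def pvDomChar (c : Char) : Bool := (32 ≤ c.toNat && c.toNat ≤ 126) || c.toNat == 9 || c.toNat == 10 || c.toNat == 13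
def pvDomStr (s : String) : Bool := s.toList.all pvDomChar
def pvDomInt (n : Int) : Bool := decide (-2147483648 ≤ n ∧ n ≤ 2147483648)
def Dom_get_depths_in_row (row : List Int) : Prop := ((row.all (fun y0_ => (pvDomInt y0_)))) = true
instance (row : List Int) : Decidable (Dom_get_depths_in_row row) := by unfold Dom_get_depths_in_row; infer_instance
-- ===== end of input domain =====

-- B replaces A's start-pointer/range()-reconstruction with a uniform accumulate-and-flush pass (objective: simpler); proved equal on all inputs.


-- ===== PORT A =====
-- A's loop over range(len(row)) with state (b, start); row[i] and row[i-1] are always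
-- in range whenever Python evaluates them inside the loop, so pyGetD with default 0 is exact here.
def pvALoop (row : List Int) (idxs : List Int) (b : List (List Int)) (start : Int) :
    List (List Int) :=
  match idxs with
  | [] => b
  | i :: rest =>
    let b' :=
      if PySem.List.pyGetD row i 0 = 9 ∧ PySem.List.pyGetD row (i - 1) 0 ≠ 9 ∧ i ≠ 0 then
        b ++ [PySem.List.pyRange start i 1]
      else if i = (row.length : Int) - 1 ∧ PySem.List.pyGetD row i 0 ≠ 9 then
        b ++ [PySem.List.pyRange start (i + 1) 1]
      else b
    let start' := if PySem.List.pyGetD row i 0 = 9 then i + 1 else start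
    pvALoop row rest b' start'

def get_depths_in_row (row : List Int) : List (List Int) :=
  pvALoop row (PySem.List.pyRange 0 (row.length : Int) 1) [] 0

-- ===== PORT B =====
-- B's loop over enumerate(row) with state (b, current); final flush after the loop.
def pvBLoop (pairs : List (Int × Int)) (b : List (List Int)) (cur : List Int) :
    List (List Int) :=
  match pairs with
  | [] => if cur ≠ [] then b ++ [cur] else b
  | (i, v) :: rest =>
    if v = 9 then
      if cur ≠ [] then pvBLoop rest (b ++ [cur]) []
      else pvBLoop rest b cur
    else pvBLoop rest b (cur ++ [i])

def get_depths_in_row_alt (row : List Int) : List (List Int) :=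
  pvBLoop (PySem.List.enumerate row 0) [] []

-- ===== PRECONDITION & SPEC =====
def Spec_get_depths_in_row (row : List Int) (out : List (List Int)) : Prop := out = get_depths_in_row_alt row
instance (row : List Int) (out : List (List Int)) : Decidable (Spec_get_depths_in_row row out) := by unfold Spec_get_depths_in_row; infer_instance

-- ===== CLAIM (what is proved, stated in full; the proofs are below) =====
def Claim_equal_get_depths_in_row : Prop := ∀ (row : List Int), Dom_get_depths_in_row row → Spec_get_depths_in_row row (get_depths_in_row row)

-- ===== LEMMAS AND PROOFS =====

theorem pv_pyRange_nil_iff (a b : Int) : PySem.List.pyRange a b 1 = [] ↔ b ≤ a := by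
  constructor
  · intro h
    by_contra hc
    have := PySem.List.length_pyRange_one (a := a) (b := b)
    rw [h] at this; simp at this; omega
  · exact PySem.List.pyRange_one_eq_nil

-- Main loop invariant: with pre already consumed and i = pre.length, B's `cur` is
-- A's pending segment pyRange start i; start ≤ i; start = i iff i = 0 or row[i-1] = 9;
-- and the state is never final-with-pending (rest = [] → start = i), since A flushes
-- the last segment inside the loop at i = len-1.
theorem pv_loop_eq (row : List Int) :
    ∀ (rest pre : List Int) (b : List (List Int)) (start : Int),
      row = pre ++ rest →
      0 ≤ start → start ≤ (pre.length : Int) →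
      ((pre.length : Int) ≠ 0 →
        (PySem.List.pyGetD row ((pre.length : Int) - 1) 0 = 9 ↔ start = (pre.length : Int))) →
      (rest = [] → start = (pre.length : Int)) →
      pvALoop row (PySem.List.pyRange (pre.length : Int) (row.length : Int) 1) b start =
        pvBLoop (PySem.List.enumerate rest (pre.length : Int)) b
          (PySem.List.pyRange start (pre.length : Int) 1) := by
  intro rest
  induction rest with
  | nil =>
    intro pre b start hrow h0 hle hprev hnil
    have hs : start = (pre.length : Int) := hnil rfl
    have hlen : (row.length : Int) = (pre.length : Int) := by subst hrow; simp
    rw [hlen, PySem.List.pyRange_one_eq_nil (le_refl _), hs,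
        PySem.List.pyRange_one_eq_nil (le_refl _)]
    simp [pvALoop, PySem.List.enumerate_nil, pvBLoop]
  | cons v rest' ih =>
    intro pre b start hrow h0 hle hprev hnil
    have hlen : (row.length : Int) = (pre.length : Int) + 1 + (rest'.length : Int) := by
      subst hrow; simp; omega
    have hilt : (pre.length : Int) < (row.length : Int) := by omega
    have hvi : PySem.List.pyGetD row (pre.length : Int) 0 = v := by
      subst hrow; simp [PySem.List.pyGetD_natCast, List.getD]
    have hcurnil : PySem.List.pyRange start (pre.length : Int) 1 = [] ↔
        start = (pre.length : Int) := by
      rw [pv_pyRange_nil_iff]; omega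
    have hpre1 : ((pre ++ [v]).length : Int) = (pre.length : Int) + 1 := by simp
    have hrow' : row = (pre ++ [v]) ++ rest' := by simp [hrow]
    rw [PySem.List.pyRange_one_cons hilt, PySem.List.enumerate_cons]
    simp only [pvALoop, pvBLoop, hvi]
    by_cases hv : v = 9
    · -- current element is a 9: both flush cur iff nonempty, cur resets, start := i+1
      subst hv
      rw [if_neg (fun h : _ ∧ (9:Int) ≠ 9 => h.2 rfl), if_pos rfl, if_pos rfl]
      have hih : ∀ b2 : List (List Int),
          pvALoop row (PySem.List.pyRange ((pre.length : Int) + 1) (row.length : Int) 1) b2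
            ((pre.length : Int) + 1) =
          pvBLoop (PySem.List.enumerate rest' ((pre.length : Int) + 1)) b2 [] := by
        intro b2
        have := ih (pre ++ [9]) b2 ((pre.length : Int) + 1) (by simpa using hrow')
          (by omega) (by rw [hpre1])
          (fun _ => by
            rw [hpre1]
            constructor
            · intro _; rfl
            · intro _
              have h1 : ((pre.length : Int) + 1) - 1 = (pre.length : Int) := by omega
              rw [h1, hvi])
          (fun _ => by rw [hpre1])
        rw [hpre1] at this
        rw [this, PySem.List.pyRange_one_eq_nil (le_refl _)]
      by_cases hs : start = (pre.length : Int)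
      · have hcz : PySem.List.pyRange start (pre.length : Int) 1 = [] := hcurnil.mpr hs
        rw [hcz]
        rw [if_neg (by
          by_cases hi0 : (pre.length : Int) = 0
          · exact fun h => h.2.2 hi0
          · exact fun h => h.2.1 ((hprev hi0).mpr hs))]
        rw [if_neg (by simp)]
        exact hih b
      · have hi0 : (pre.length : Int) ≠ 0 := by omega
        rw [if_pos ⟨rfl, fun h => hs ((hprev hi0).mp h), hi0⟩,
            if_pos (by simp [hcurnil, hs])]
        exact hih _
    · -- current element is not 9: A may flush at the last index; B appends i to cur
      rw [if_neg (by tauto)]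
      simp only [if_neg hv]
      have hcur' : PySem.List.pyRange start ((pre.length : Int) + 1) 1 =
          PySem.List.pyRange start (pre.length : Int) 1 ++ [(pre.length : Int)] :=
        PySem.List.pyRange_one_succ_right hle
      by_cases hre : rest' = []
      · -- last element: A flushes pyRange start (i+1) inside the loop, B after the loop
        subst hre
        have hlast : (pre.length : Int) = (row.length : Int) - 1 := by
          simp at hlen; omega
        rw [if_pos ⟨hlast, hv⟩]
        have hempty : PySem.List.pyRange ((pre.length : Int) + 1) ((row.length : Int)) 1 = [] := by
          rw [pv_pyRange_nil_iff]; omega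
        rw [hempty]
        simp only [pvALoop, PySem.List.enumerate_nil, pvBLoop]
        rw [if_pos (by simp)]
        rw [hcur']
      · -- middle element: neither side flushes
        have hnotlast : ¬((pre.length : Int) = (row.length : Int) - 1 ∧ v ≠ 9) := by
          intro ⟨h1, _⟩
          have : (rest'.length : Int) = 0 := by omega
          simp at this
          exact hre this
        rw [if_neg hnotlast]
        have := ih (pre ++ [v]) b start (by simpa using hrow') h0 (by rw [hpre1]; omega)
          (fun _ => by
            rw [hpre1]
            have h1 : ((pre.length : Int) + 1) - 1 = (pre.length : Int) := by omega
            rw [h1, hvi]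
            constructor
            · intro h; exact absurd h hv
            · intro h; omega)
          (fun h => absurd h hre)
        rw [hpre1] at this
        rw [this, hcur']

-- ===== VERDICT (by name: the statement is the Claim_ definition above) =====
theorem get_depths_in_row_spec : Claim_equal_get_depths_in_row := by
  intro row _
  unfold Spec_get_depths_in_row get_depths_in_row get_depths_in_row_alt
  have h := pv_loop_eq row row [] [] 0 (by simp) (le_refl _) (by simp) (by simp)
    (fun _ => by simp)
  simpa using h
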